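-- pv_equiv track=rewrite | github.com/STliuEN/CCGC | scripts/render_dsafc_compact_tables.py | _sparsify_group_col
-- ===== SOURCE A (Python) =====
-- def _sparsify_group_col(rows: list[list[str]], group_col: int = 0) -> list[list[str]]:
--     sparse_rows: list[list[str]] = []
--     last_group = None
--     for row in rows:
--         sparse_row = row.copy()
--         if sparse_row[group_col] == last_group:
--             sparse_row[group_col] = ""
--         else:
--             last_group = sparse_row[group_col]
--         sparse_rows.append(sparse_row)
--     return sparse_rows
-- ===== SOURCE B (Python) =====
-- def _sparsify_group_col(rows: list[list[str]], group_col: int = 0) -> list[list[str]]: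
--     out: list[list[str]] = []
--     i = 0
--     n = len(rows)
--     while i < n:
--         key = rows[i][group_col]
--         out.append(rows[i].copy())
--         j = i + 1
--         while j < n and rows[j][group_col] == key:
--             c = rows[j].copy()
--             c[group_col] = ""
--             out.append(c)
--             j += 1
--         i = j
--     return out
-- ===== Notes on version B (the rewrite author's own statement) =====
-- stated objective: alternative
-- what changed: Replaces the single-pass fold carrying a last-group sentinel (initialised to None) with a nested run-scanning loop: the outer loop takes each run leader unchanged, the inner loop blanks the rest of the run, so no sentinel state is threaded through.
import Mathlib
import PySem

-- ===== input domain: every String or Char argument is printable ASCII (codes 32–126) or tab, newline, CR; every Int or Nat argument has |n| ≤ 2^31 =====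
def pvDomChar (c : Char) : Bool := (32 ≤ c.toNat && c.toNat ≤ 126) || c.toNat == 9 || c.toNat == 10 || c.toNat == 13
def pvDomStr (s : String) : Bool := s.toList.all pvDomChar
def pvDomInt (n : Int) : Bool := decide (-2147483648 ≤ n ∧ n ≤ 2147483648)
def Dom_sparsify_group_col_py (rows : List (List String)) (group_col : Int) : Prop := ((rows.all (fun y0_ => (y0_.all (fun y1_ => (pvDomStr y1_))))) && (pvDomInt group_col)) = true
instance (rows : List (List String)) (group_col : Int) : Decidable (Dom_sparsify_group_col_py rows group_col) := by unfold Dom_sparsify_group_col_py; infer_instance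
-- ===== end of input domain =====

-- B replaces A's single-pass fold with a None sentinel by a nested run-scanning loop (run leader kept, rest of run blanked); equal on Pre_ (group_col in range for every row); neither implementation mutates its input.


-- ===== PORT A =====
-- fold over rows with state (sparse_rows, last_group : Option String); pyGetD/pySetD are exact under Pre_ (index in range)
def sparsify_group_col_py (rows : List (List String)) (group_col : Int) : List (List String) :=
  (rows.foldl
    (fun (st : List (List String) × Option String) row =>
      let v := PySem.List.pyGetD row group_col ""
      if st.2 = some v then
        (st.1 ++ [PySem.List.pySetD row group_col ""], st.2)
      else
        (st.1 ++ [row], some v))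
    ([], none)).1

-- ===== PORT B =====
-- inner while loop of Source B: blank the rows of the current run, return (blanked run tail, remaining rows)
def pvTakeRun (key : String) (group_col : Int) : List (List String) → List (List String) × List (List String)
  | [] => ([], [])
  | r :: rs =>
    if PySem.List.pyGetD r group_col "" = key then
      let p := pvTakeRun key group_col rs
      (PySem.List.pySetD r group_col "" :: p.1, p.2)
    else ([], r :: rs)

theorem pvTakeRun_len (key : String) (group_col : Int) (rs : List (List String)) :
    (pvTakeRun key group_col rs).2.length ≤ rs.length := by
  induction rs with
  | nil => simp [pvTakeRun]
  | cons r rs ih =>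
    simp only [pvTakeRun]
    split
    · simpa using Nat.le_succ_of_le ih
    · simp

-- outer while loop of Source B: emit the run leader unchanged, then the blanked run, then recurse on the rest
def sparsify_group_col_py_alt (rows : List (List String)) (group_col : Int) : List (List String) :=
  match rows with
  | [] => []
  | r :: rs =>
    let p := pvTakeRun (PySem.List.pyGetD r group_col "") group_col rs
    r :: p.1 ++ sparsify_group_col_py_alt p.2 group_col
termination_by rows.length
decreasing_by
  exact Nat.lt_succ_of_le (pvTakeRun_len _ _ _)

-- ===== PRECONDITION & SPEC =====
-- Pre_: group_col is a valid (possibly negative) Python index into every row; outside it A raises IndexError.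
def Pre_sparsify_group_col_py (rows : List (List String)) (group_col : Int) : Prop :=
  ∀ row ∈ rows, PySem.Raise.InRange row.length group_col
instance (rows : List (List String)) (group_col : Int) : Decidable (Pre_sparsify_group_col_py rows group_col) := by unfold Pre_sparsify_group_col_py; infer_instance

def pvWitness_sparsify_group_col_py : List (List String) × Int :=
  ([["a", "1"], ["a", "2"], ["b", "3"]], 0)

def Spec_sparsify_group_col_py (rows : List (List String)) (group_col : Int) (out : List (List String)) : Prop := out = sparsify_group_col_py_alt rows group_col
instance (rows : List (List String)) (group_col : Int) (out : List (List String)) : Decidable (Spec_sparsify_group_col_py rows group_col out) := by unfold Spec_sparsify_group_col_py; infer_instance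

-- ===== CLAIM (what is proved, stated in full; the proofs are below) =====
def Claim_equal_sparsify_group_col_py : Prop := ∀ (rows : List (List String)) (group_col : Int), Dom_sparsify_group_col_py rows group_col → Pre_sparsify_group_col_py rows group_col → Spec_sparsify_group_col_py rows group_col (sparsify_group_col_py rows group_col)

-- ===== LEMMAS AND PROOFS =====

-- sequential semantics of A's loop, with the accumulator pulled out
def pvGo (group_col : Int) (last : Option String) : List (List String) → List (List String)
  | [] => []
  | r :: rs =>
    let v := PySem.List.pyGetD r group_col ""
    if last = some v then PySem.List.pySetD r group_col "" :: pvGo group_col last rs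
    else r :: pvGo group_col (some v) rs

theorem pvFoldA (group_col : Int) (rows : List (List String)) :
    ∀ (acc : List (List String)) (last : Option String),
    (rows.foldl
      (fun (st : List (List String) × Option String) row =>
        let v := PySem.List.pyGetD row group_col ""
        if st.2 = some v then
          (st.1 ++ [PySem.List.pySetD row group_col ""], st.2)
        else
          (st.1 ++ [row], some v))
      (acc, last)).1 = acc ++ pvGo group_col last rows := by
  induction rows with
  | nil => intro acc last; simp [pvGo]
  | cons r rs ih =>
    intro acc last
    simp only [List.foldl_cons, pvGo]
    by_cases h : last = some (PySem.List.pyGetD r group_col "")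
    · simp [h, ih]
    · simp [h, ih]

theorem pvGo_some (group_col : Int) (rows : List (List String)) :
    ∀ k : String,
    pvGo group_col (some k) rows =
      (pvTakeRun k group_col rows).1 ++
        sparsify_group_col_py_alt (pvTakeRun k group_col rows).2 group_col := by
  induction rows with
  | nil => intro k; simp [pvGo, pvTakeRun, sparsify_group_col_py_alt]
  | cons r rs ih =>
    intro k
    by_cases h : PySem.List.pyGetD r group_col "" = k
    · simp only [pvGo, pvTakeRun, h]
      simpa using ih k
    · have h' : ¬ (some k = some (PySem.List.pyGetD r group_col "")) := by
        intro hc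
        exact h (Option.some.inj hc).symm
      simp only [pvGo, pvTakeRun, if_neg h, if_neg h']
      rw [sparsify_group_col_py_alt]
      simp [ih]

theorem pvGo_none (group_col : Int) (rows : List (List String)) :
    pvGo group_col none rows = sparsify_group_col_py_alt rows group_col := by
  cases rows with
  | nil => simp [pvGo, sparsify_group_col_py_alt]
  | cons r rs =>
    rw [sparsify_group_col_py_alt]
    simp only [pvGo, if_neg (by simp : ¬ (none : Option String) = some (PySem.List.pyGetD r group_col ""))]
    simp [pvGo_some]

-- ===== VERDICT (by name: the statement is the Claim_ definition above) =====
theorem sparsify_group_col_py_spec : Claim_equal_sparsify_group_col_py := by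
  intro rows group_col _ _
  unfold Spec_sparsify_group_col_py sparsify_group_col_py
  rw [pvFoldA, pvGo_none]
  simp
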